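-- pv_equiv track=rewrite | github.com/shashwat7816/code-debugger | api/index.py | format_bot_response
-- ===== SOURCE A (Python) =====
-- def format_bot_response(response, language):
--     """Format the bot's response to highlight code blocks and explanations"""
--     formatted_text = ""
--     lines = response.split('\n')
--     in_code_block = False
--     code_block = []
--
--     for line in lines:
--         # Check for code block markers ```
--         if line.strip().startswith('```') or line.strip() == '```':
--             if in_code_block:
--                 # End of code block
--                 formatted_text += "\n<div class='code-block'>\n"
--                 code_text = "\n".join(code_block)
--                 formatted_text += code_text + "\n"
--                 formatted_text += "</div>\n\n"
--                 code_block = []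
--                 in_code_block = False
--             else:
--                 # Start of code block
--                 in_code_block = True
--             continue
--
--         if in_code_block:
--             # Collect code block lines
--             code_block.append(line)
--         else:
--             # Regular text - check for special formatting
--             if line.strip().startswith('#') or line.strip().startswith('##'):
--                 # Heading
--                 formatted_text += f"<h3>{line}</h3>\n"
--             elif line.strip().startswith('- ') or line.strip().startswith('* '):
--                 # List item
--                 formatted_text += f"<li>{line[2:]}</li>\n"
--             elif "ERROR" in line.upper() or "ISSUE" in line.upper():
--                 # Error or issue description
--                 formatted_text += f"<div class='error'>{line}</div>\n"
--             elif "FIXED" in line.upper() or "SOLUTION" in line.upper():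
--                 # Solution or fix
--                 formatted_text += f"<div class='success'>{line}</div>\n"
--             else:
--                 # Regular explanation text
--                 formatted_text += f"{line}\n"
--
--     # Handle any remaining code block
--     if code_block:
--         formatted_text += "\n<div class='code-block'>\n"
--         code_text = "\n".join(code_block)
--         formatted_text += code_text + "\n"
--         formatted_text += "</div>\n\n"
--
--     return formatted_text
-- ===== SOURCE B (Python) =====
-- def _render_line(line):
--     s = line.strip()
--     if s.startswith('#'):
--         return f"<h3>{line}</h3>\n"
--     if s.startswith('- ') or s.startswith('* '):
--         return f"<li>{line[2:]}</li>\n"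
--     u = line.upper()
--     if "ERROR" in u or "ISSUE" in u:
--         return f"<div class='error'>{line}</div>\n"
--     if "FIXED" in u or "SOLUTION" in u:
--         return f"<div class='success'>{line}</div>\n"
--     return f"{line}\n"
--
--
-- def _render_segment(is_code, seg):
--     if is_code:
--         return "\n<div class='code-block'>\n" + "\n".join(seg) + "\n</div>\n\n"
--     return "".join(map(_render_line, seg))
--
--
-- def format_bot_response(response, language):
--     """Two-pass: partition lines into text/code segments, then render each."""
--     segments, cur, in_code = [], [], False
--     for line in response.split('\n'):
--         if line.strip().startswith('```'):
--             segments.append((in_code, cur))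
--             cur, in_code = [], not in_code
--         else:
--             cur.append(line)
--     if in_code:
--         if cur:  # an unterminated trailing code block renders only when non-empty
--             segments.append((True, cur))
--     else:
--         segments.append((False, cur))
--     return "".join(_render_segment(c, seg) for c, seg in segments)
-- ===== Notes on version B (the rewrite author's own statement) =====
-- stated objective: alternative
-- what changed: Replaces A's single state-machine loop (mutable in_code flag, immediate string appends, trailing-block patch-up) by a two-pass design: one pass partitions the lines into tagged text/code segments, a second pass renders each segment independently and joins the results once.
import Mathlib
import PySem

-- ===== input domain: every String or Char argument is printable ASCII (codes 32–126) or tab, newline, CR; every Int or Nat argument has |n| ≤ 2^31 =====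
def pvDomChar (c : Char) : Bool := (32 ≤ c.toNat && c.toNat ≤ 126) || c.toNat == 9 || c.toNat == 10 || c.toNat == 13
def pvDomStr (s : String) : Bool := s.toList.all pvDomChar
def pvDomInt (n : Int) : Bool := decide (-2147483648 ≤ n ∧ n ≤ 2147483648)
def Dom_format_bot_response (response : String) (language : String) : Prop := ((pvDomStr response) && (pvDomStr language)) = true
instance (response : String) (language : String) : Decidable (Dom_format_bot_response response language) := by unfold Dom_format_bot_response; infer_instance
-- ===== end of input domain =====

-- B replaces A's one-pass state machine (mutable in_code flag, immediate appends, trailing patch-up)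
-- by a two-pass design: partition lines into tagged text/code segments, then render each segment. Objective: alternative.


-- ===== PORT A =====
-- A's loop body: one step of the state machine over (formatted_text, in_code_block, code_block).
def fbrA_step (st : List Char × Bool × List (List Char)) (line : List Char) :
    List Char × Bool × List (List Char) :=
  let ft := st.1; let inCode := st.2.1; let cb := st.2.2
  if PySem.Chars.startswith (PySem.Chars.strip line) "```".toList
      || (PySem.Chars.strip line == "```".toList) then
    if inCode then
      (ft ++ "\n<div class='code-block'>\n".toList
          ++ (PySem.Chars.join "\n".toList cb ++ "\n".toList) ++ "</div>\n\n".toList,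
       false, [])
    else (ft, true, cb)
  else if inCode then (ft, inCode, cb ++ [line])
  else if PySem.Chars.startswith (PySem.Chars.strip line) "#".toList
      || PySem.Chars.startswith (PySem.Chars.strip line) "##".toList then
    (ft ++ ("<h3>".toList ++ line ++ "</h3>\n".toList), inCode, cb)
  else if PySem.Chars.startswith (PySem.Chars.strip line) "- ".toList
      || PySem.Chars.startswith (PySem.Chars.strip line) "* ".toList then
    (ft ++ ("<li>".toList ++ PySem.Chars.slice line (some 2) none ++ "</li>\n".toList), inCode, cb)
  else if PySem.Chars.isIn "ERROR".toList (PySem.Chars.upper line)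
      || PySem.Chars.isIn "ISSUE".toList (PySem.Chars.upper line) then
    (ft ++ ("<div class='error'>".toList ++ line ++ "</div>\n".toList), inCode, cb)
  else if PySem.Chars.isIn "FIXED".toList (PySem.Chars.upper line)
      || PySem.Chars.isIn "SOLUTION".toList (PySem.Chars.upper line) then
    (ft ++ ("<div class='success'>".toList ++ line ++ "</div>\n".toList), inCode, cb)
  else (ft ++ (line ++ "\n".toList), inCode, cb)

def format_bot_response (response : String) (language : String) : String :=
  let lines := PySem.Chars.splitOn response.toList "\n".toList
  let st := lines.foldl fbrA_step ([], false, [])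
  -- trailing `if code_block:` of A
  if st.2.2.isEmpty then String.ofList st.1
  else String.ofList (st.1 ++ "\n<div class='code-block'>\n".toList
          ++ (PySem.Chars.join "\n".toList st.2.2 ++ "\n".toList) ++ "</div>\n\n".toList)

-- ===== PORT B =====
-- _render_line of Source B
def fbrB_line (line : List Char) : List Char :=
  let s := PySem.Chars.strip line
  if PySem.Chars.startswith s "#".toList then
    "<h3>".toList ++ line ++ "</h3>\n".toList
  else if PySem.Chars.startswith s "- ".toList || PySem.Chars.startswith s "* ".toList then
    "<li>".toList ++ PySem.Chars.slice line (some 2) none ++ "</li>\n".toList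
  else
    let u := PySem.Chars.upper line
    if PySem.Chars.isIn "ERROR".toList u || PySem.Chars.isIn "ISSUE".toList u then
      "<div class='error'>".toList ++ line ++ "</div>\n".toList
    else if PySem.Chars.isIn "FIXED".toList u || PySem.Chars.isIn "SOLUTION".toList u then
      "<div class='success'>".toList ++ line ++ "</div>\n".toList
    else line ++ "\n".toList

-- _render_segment of Source B
def fbrB_renderSeg (seg : Bool × List (List Char)) : List Char :=
  if seg.1 then
    "\n<div class='code-block'>\n".toList ++ PySem.Chars.join "\n".toList seg.2 ++ "\n</div>\n\n".toList
  else PySem.Chars.join [] (seg.2.map fbrB_line)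

-- pass 1 of Source B: partition the lines into tagged segments
def fbrB_segs : List (List Char) → Bool → List (List Char) → List (Bool × List (List Char))
  | [], inCode, cur =>
    if inCode then (if cur.isEmpty then [] else [(true, cur)]) else [(false, cur)]
  | l :: ls, inCode, cur =>
    if PySem.Chars.startswith (PySem.Chars.strip l) "```".toList then
      (inCode, cur) :: fbrB_segs ls (!inCode) []
    else fbrB_segs ls inCode (cur ++ [l])

def format_bot_response_alt (response : String) (language : String) : String :=
  String.ofList (PySem.Chars.join []
      ((fbrB_segs (PySem.Chars.splitOn response.toList "\n".toList) false []).map fbrB_renderSeg))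

-- ===== PRECONDITION & SPEC =====
def Spec_format_bot_response (response : String) (language : String) (out : String) : Prop := out = format_bot_response_alt response language
instance (response : String) (language : String) (out : String) : Decidable (Spec_format_bot_response response language out) := by unfold Spec_format_bot_response; infer_instance

-- ===== CLAIM (what is proved, stated in full; the proofs are below) =====
def Claim_equal_format_bot_response : Prop := ∀ (response : String) (language : String), Dom_format_bot_response response language → Spec_format_bot_response response language (format_bot_response response language)

-- ===== LEMMAS AND PROOFS =====

-- A's final "flush a non-empty leftover code block" step, as a function of the loop state.
def fbrA_finish (st : List Char × Bool × List (List Char)) : List Char :=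
  if st.2.2.isEmpty then st.1
  else st.1 ++ "\n<div class='code-block'>\n".toList
          ++ (PySem.Chars.join "\n".toList st.2.2 ++ "\n".toList) ++ "</div>\n\n".toList

theorem join_nil_cons (a : List Char) (l : List (List Char)) :
    PySem.Chars.join [] (a :: l) = a ++ PySem.Chars.join [] l := by
  cases l with
  | nil => simp [PySem.Chars.join_singleton, PySem.Chars.join_nil]
  | cons b t => simp [PySem.Chars.join_cons_cons]

theorem join_nil_append (a b : List (List Char)) :
    PySem.Chars.join [] (a ++ b) = PySem.Chars.join [] a ++ PySem.Chars.join [] b := by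
  induction a with
  | nil => simp [PySem.Chars.join_nil]
  | cons x t ih => simp [join_nil_cons, ih]

theorem sw_hash (s : List Char) (h : PySem.Chars.startswith s "#".toList = false) :
    PySem.Chars.startswith s "##".toList = false := by
  by_contra hne
  have h2 : PySem.Chars.startswith s "##".toList = true := by
    cases hx : PySem.Chars.startswith s "##".toList <;> simp_all
  have hp : "##".toList <+: s := (PySem.Chars.startswith_iff s _).mp h2
  have hp1 : "#".toList <+: s := List.IsPrefix.trans (by decide) hp
  have := (PySem.Chars.startswith_iff s "#".toList).mpr hp1
  exact absurd (this.symm.trans h) (by decide)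

theorem fence_false (l : List Char)
    (hf : PySem.Chars.startswith (PySem.Chars.strip l) "```".toList = false) :
    ¬ PySem.Chars.strip l = "```".toList := by
  intro he
  have h2 : PySem.Chars.startswith (PySem.Chars.strip l) "```".toList = true := by
    rw [PySem.Chars.startswith_iff, he]
  exact absurd (h2.symm.trans hf) (by decide)

-- A's inline text-line formatting equals B's _render_line.
theorem fmt_line_eq (ft : List Char) (line : List Char) (cb : List (List Char))
    (hf : PySem.Chars.startswith (PySem.Chars.strip line) "```".toList = false) :
    fbrA_step (ft, false, cb) line = (ft ++ fbrB_line line, false, cb) := by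
  have hne := fence_false line hf
  simp at hf hne
  by_cases h1 : PySem.Chars.startswith (PySem.Chars.strip line) "#".toList
  · simp at h1
    simp [fbrA_step, fbrB_line, hf, hne, h1]
  · have h1' : PySem.Chars.startswith (PySem.Chars.strip line) "#".toList = false := by
      simpa using h1
    have h2 := sw_hash _ h1'
    simp at h1' h2
    simp [fbrA_step, fbrB_line, hf, hne, h1', h2]
    split_ifs <;> simp [List.append_assoc]

-- A's step on a closing fence, and on a code line, resp. an opening fence.
theorem fence_step_open (ft : List Char) (cb : List (List Char)) (l : List Char)
    (hf : PySem.Chars.startswith (PySem.Chars.strip l) "```".toList = true) :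
    fbrA_step (ft, false, cb) l = (ft, true, cb) := by
  simp at hf
  simp [fbrA_step, hf]

theorem fence_step_close (ft : List Char) (cb : List (List Char)) (l : List Char)
    (hf : PySem.Chars.startswith (PySem.Chars.strip l) "```".toList = true) :
    fbrA_step (ft, true, cb) l
      = (ft ++ "\n<div class='code-block'>\n".toList
          ++ (PySem.Chars.join "\n".toList cb ++ "\n".toList) ++ "</div>\n\n".toList,
         false, []) := by
  simp at hf
  simp [fbrA_step, hf]

theorem code_step (ft : List Char) (cb : List (List Char)) (l : List Char)
    (hf : PySem.Chars.startswith (PySem.Chars.strip l) "```".toList = false) :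
    fbrA_step (ft, true, cb) l = (ft, true, cb ++ [l]) := by
  have hne := fence_false l hf
  simp at hf hne
  simp [fbrA_step, hf, hne]

-- B's code-segment rendering equals the block A emits (same chars, regrouped).
theorem renderSeg_code (cur : List (List Char)) :
    fbrB_renderSeg (true, cur)
      = "\n<div class='code-block'>\n".toList
          ++ (PySem.Chars.join "\n".toList cur ++ "\n".toList) ++ "</div>\n\n".toList := by
  simp [fbrB_renderSeg, List.append_assoc]

-- the loop invariant: running A's machine from a state that already rendered B's pending
-- text (text mode) / holds B's pending code lines (code mode) yields B's segment rendering.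
theorem main_inv (lines : List (List Char)) :
    ∀ (cur : List (List Char)) (ft : List Char),
      (fbrA_finish (lines.foldl fbrA_step (ft, true, cur))
        = ft ++ PySem.Chars.join [] ((fbrB_segs lines true cur).map fbrB_renderSeg))
      ∧ (fbrA_finish (lines.foldl fbrA_step (ft ++ PySem.Chars.join [] (cur.map fbrB_line), false, []))
        = ft ++ PySem.Chars.join [] ((fbrB_segs lines false cur).map fbrB_renderSeg)) := by
  induction lines with
  | nil =>
    intro cur ft
    constructor
    · cases hc : cur.isEmpty with
      | true =>
        have : cur = [] := by simpa using hc
        subst this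
        simp [fbrB_segs, fbrA_finish, PySem.Chars.join_nil]
      | false =>
        simp [List.foldl_nil, fbrB_segs, hc, fbrA_finish, join_nil_cons, renderSeg_code,
          PySem.Chars.join_nil, List.append_assoc]
    · simp [List.foldl_nil, fbrB_segs, fbrA_finish, join_nil_cons, fbrB_renderSeg,
        PySem.Chars.join_nil]
  | cons l ls ih =>
    intro cur ft
    constructor
    · -- in code mode
      by_cases hf : PySem.Chars.startswith (PySem.Chars.strip l) "```".toList = true
      · -- closing fence
        rw [List.foldl_cons, fence_step_close ft cur l hf]
        have hih := (ih []
          (ft ++ "\n<div class='code-block'>\n".toList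
            ++ (PySem.Chars.join "\n".toList cur ++ "\n".toList) ++ "</div>\n\n".toList)).2
        simp only [List.map_nil, PySem.Chars.join_nil, List.append_nil] at hih
        rw [hih]
        have hfn := hf; simp at hfn
        simp [fbrB_segs, hfn, join_nil_cons, renderSeg_code, List.append_assoc]
      · -- a code line
        have hf' : PySem.Chars.startswith (PySem.Chars.strip l) "```".toList = false := by
          simpa using hf
        rw [List.foldl_cons, code_step ft cur l hf']
        have hih := (ih (cur ++ [l]) ft).1
        rw [hih]
        have hfn := hf'; simp at hfn
        simp [fbrB_segs, hfn]
    · -- in text mode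
      by_cases hf : PySem.Chars.startswith (PySem.Chars.strip l) "```".toList = true
      · -- opening fence
        rw [List.foldl_cons, fence_step_open _ [] l hf]
        have hih := (ih [] (ft ++ PySem.Chars.join [] (cur.map fbrB_line))).1
        rw [hih]
        have hfn := hf; simp at hfn
        simp [fbrB_segs, hfn, join_nil_cons, fbrB_renderSeg, List.append_assoc]
      · -- a text line
        have hf' : PySem.Chars.startswith (PySem.Chars.strip l) "```".toList = false := by
          simpa using hf
        rw [List.foldl_cons, fmt_line_eq _ l [] hf']
        have hih := (ih (cur ++ [l]) ft).2
        rw [List.map_append, join_nil_append] at hih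
        simp only [List.map_cons, List.map_nil] at hih
        rw [join_nil_cons] at hih
        simp only [PySem.Chars.join_nil, List.append_nil, ← List.append_assoc] at hih
        rw [hih]
        have hfn := hf'; simp at hfn
        simp [fbrB_segs, hfn]

-- ===== VERDICT (by name: the statement is the Claim_ definition above) =====
theorem format_bot_response_spec : Claim_equal_format_bot_response := by
  intro response language _
  unfold Spec_format_bot_response format_bot_response format_bot_response_alt
  have h := (main_inv (PySem.Chars.splitOn response.toList "\n".toList) [] []).2
  simp only [List.map_nil, PySem.Chars.join_nil, List.append_nil, List.nil_append] at h
  dsimp only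
  rw [← h]
  unfold fbrA_finish
  split <;> rfl
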